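-- pv_equiv track=rewrite | github.com/Vatsal272120/Data-Structures-and-Algorithms | Python/Arrays/ValidateSubsequence.py | isValidSubsequenceOne
-- ===== SOURCE A (Python) =====
-- def isValidSubsequenceOne(array, sequence) :
--     seqIdx = 0
--     arrayIdx = 0
--
--     while arrayIdx < len(array) and seqIdx < len(sequence) :
--         if array[arrayIdx] == sequence[seqIdx]:
--             # seqIdx will only increase if match is found
--             seqIdx += 1
--         # arrayIdx will be incremented by 1 regardless if match is found
--         arrayIdx +=1
--
--     return seqIdx == len(sequence)
-- ===== SOURCE B (Python) =====
-- def isValidSubsequenceOne(array, sequence):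
--     positions = {}
--     for i, x in enumerate(array):
--         positions.setdefault(x, []).append(i)
--     last = -1
--     for v in sequence:
--         nxt = next((i for i in positions.get(v, []) if i > last), None)
--         if nxt is None:
--             return False
--         last = nxt
--     return True
-- ===== Notes on version B (the rewrite author's own statement) =====
-- stated objective: alternative
-- what changed: Replaces A's single two-index scan of the array with a two-stage algorithm: first build a dict mapping each value to its list of occurrence positions, then walk the sequence greedily jumping to the first recorded position after the previous match, never rescanning the array.
import Mathlib
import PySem

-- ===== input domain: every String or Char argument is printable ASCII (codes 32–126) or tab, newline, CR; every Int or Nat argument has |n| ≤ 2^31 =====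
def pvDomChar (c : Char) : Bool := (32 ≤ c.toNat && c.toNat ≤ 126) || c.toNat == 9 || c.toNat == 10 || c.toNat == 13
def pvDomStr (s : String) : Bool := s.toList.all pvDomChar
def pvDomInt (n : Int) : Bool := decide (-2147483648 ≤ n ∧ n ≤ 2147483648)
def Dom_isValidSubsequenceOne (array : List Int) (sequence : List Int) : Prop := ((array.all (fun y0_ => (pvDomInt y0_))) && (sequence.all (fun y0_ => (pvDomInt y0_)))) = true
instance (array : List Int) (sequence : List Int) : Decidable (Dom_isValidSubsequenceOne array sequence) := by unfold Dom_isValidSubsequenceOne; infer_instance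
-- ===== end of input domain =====

-- B replaces A's two-index scan of the array by a prebuilt value→positions index queried greedily per sequence element; alternative algorithm, same behaviour.


-- ===== PORT A =====
-- A's while loop: both indices advance as in the Python; the guard proves the
-- indexing array[arrayIdx] / sequence[seqIdx] is in range (exactly Python's access there).
def pvLoopA (array sequence : List Int) (arrayIdx seqIdx : Nat) : Nat :=
  if h : arrayIdx < array.length ∧ seqIdx < sequence.length then
    if array[arrayIdx]'h.1 == sequence[seqIdx]'h.2 then
      pvLoopA array sequence (arrayIdx + 1) (seqIdx + 1)
    else
      pvLoopA array sequence (arrayIdx + 1) seqIdx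
  else seqIdx
termination_by array.length - arrayIdx

def isValidSubsequenceOne (array : List Int) (sequence : List Int) : Bool :=
  decide (pvLoopA array sequence 0 0 = sequence.length)

-- ===== PORT B =====
-- positions = {}; for i, x in enumerate(array): positions.setdefault(x, []).append(i)
-- (setdefault-then-append is Dict.modify with default [])
def pvBuildPos (array : List Int) : PySem.Dict Int (List Int) :=
  (PySem.List.enumerate array).foldl (fun d p => d.modify p.2 [] (fun l => l ++ [p.1])) PySem.Dict.empty

-- next((i for i in idxs if i > last), None)
def pvNextPos (last : Int) (idxs : List Int) : Option Int :=
  idxs.find? (fun i => decide (last < i))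

-- the 'for v in sequence' loop, threading last (early return False on a missing position)
def pvLoopB (d : PySem.Dict Int (List Int)) (last : Int) : List Int → Bool
  | [] => true
  | v :: s =>
    match pvNextPos last (d.getD v []) with
    | none => false
    | some i => pvLoopB d i s

def isValidSubsequenceOne_alt (array : List Int) (sequence : List Int) : Bool :=
  pvLoopB (pvBuildPos array) (-1) sequence

-- ===== PRECONDITION & SPEC =====
def Spec_isValidSubsequenceOne (array : List Int) (sequence : List Int) (out : Bool) : Prop := out = isValidSubsequenceOne_alt array sequence
instance (array : List Int) (sequence : List Int) (out : Bool) : Decidable (Spec_isValidSubsequenceOne array sequence out) := by unfold Spec_isValidSubsequenceOne; infer_instance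

-- ===== CLAIM (what is proved, stated in full; the proofs are below) =====
def Claim_equal_isValidSubsequenceOne : Prop := ∀ (array : List Int) (sequence : List Int), Dom_isValidSubsequenceOne array sequence → Spec_isValidSubsequenceOne array sequence (isValidSubsequenceOne array sequence)

-- ===== LEMMAS AND PROOFS =====

-- Canonical middle form: consume the list forward past the first match (none = no match).
def pvConsume (v : Int) : List Int → Option (List Int)
  | [] => none
  | a :: rest => if a == v then some rest else pvConsume v rest

def pvAllIn : List Int → List Int → Bool
  | _, [] => true
  | arr, v :: s =>
    match pvConsume v arr with
    | none => false
    | some r => pvAllIn r s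

theorem pvAllIn_nil_cons (v : Int) (s : List Int) : pvAllIn [] (v :: s) = false := by
  simp [pvAllIn, pvConsume]

theorem pvAllIn_cons_cons (a v : Int) (arr s : List Int) :
    pvAllIn (a :: arr) (v :: s) =
      if a == v then pvAllIn arr s else pvAllIn arr (v :: s) := by
  by_cases h : a == v <;> simp [pvAllIn, pvConsume, h]

-- A's loop returns unchanged seqIdx once arrayIdx runs off the array.
theorem pvLoopA_ge (array sequence : List Int) (i j : Nat) (hi : array.length ≤ i) :
    pvLoopA array sequence i j = j := by
  rw [pvLoopA, dif_neg (by omega)]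

theorem pvKey (array sequence : List Int) :
    ∀ n i j, array.length - i ≤ n → j ≤ sequence.length →
      decide (pvLoopA array sequence i j = sequence.length)
        = pvAllIn (array.drop i) (sequence.drop j) := by
  intro n
  induction n with
  | zero =>
    intro i j h1 h2
    have hi : array.length ≤ i := by omega
    rw [pvLoopA_ge array sequence i j hi, List.drop_eq_nil_of_le hi]
    rcases Nat.lt_or_ge j sequence.length with hj | hj
    · rw [List.drop_eq_getElem_cons hj, pvAllIn_nil_cons]
      simp; omega
    · have hje : j = sequence.length := by omega
      subst hje
      simp [pvAllIn]
  | succ n ih =>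
    intro i j h1 h2
    rcases Nat.lt_or_ge i array.length with hi | hi
    · rcases Nat.lt_or_ge j sequence.length with hj | hj
      · rw [pvLoopA, dif_pos ⟨hi, hj⟩]
        rw [List.drop_eq_getElem_cons hi, List.drop_eq_getElem_cons hj,
            pvAllIn_cons_cons]
        by_cases heq : array[i] == sequence[j]
        · rw [if_pos heq, if_pos heq]
          exact ih (i + 1) (j + 1) (by omega) (by omega)
        · rw [if_neg heq, if_neg heq, ← List.drop_eq_getElem_cons hj]
          exact ih (i + 1) j (by omega) h2
      · have hje : j = sequence.length := by omega
        subst hje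
        rw [pvLoopA, dif_neg (by omega), List.drop_length]
        simp [pvAllIn]
    · rw [pvLoopA_ge array sequence i j hi, List.drop_eq_nil_of_le hi]
      rcases Nat.lt_or_ge j sequence.length with hj | hj
      · rw [List.drop_eq_getElem_cons hj, pvAllIn_nil_cons]
        simp; omega
      · have hje : j = sequence.length := by omega
        subst hje
        simp [pvAllIn]

-- The positions list the dict stores for v: first components of the enumerate pairs whose value is v.
def pvOcc (v : Int) (s : Int) (arr : List Int) : List Int :=
  ((PySem.List.enumerate arr s).filter (fun p => p.2 == v)).map (·.1)

theorem pvBuildPos_getD (arr : List Int) (v : Int) :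
    (pvBuildPos arr).getD v [] = pvOcc v 0 arr := by
  unfold pvBuildPos pvOcc
  rw [show (PySem.List.enumerate arr).foldl (fun d p => d.modify p.2 [] (fun l => l ++ [p.1])) PySem.Dict.empty
      = ((PySem.List.enumerate arr).map (fun p => (p.2, p.1))).foldl (fun d p => d.modify p.1 [] (fun l => l ++ [p.2])) PySem.Dict.empty
      from by rw [List.foldl_map]]
  rw [PySem.Dict.getD_foldl_modify_append]
  simp [List.filter_map, List.map_map, Function.comp_def]

theorem pvOcc_cons (v : Int) (s : Int) (a : Int) (arr : List Int) :
    pvOcc v s (a :: arr) = if a == v then s :: pvOcc v (s + 1) arr else pvOcc v (s + 1) arr := by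
  by_cases h : a == v <;> simp [pvOcc, PySem.List.enumerate_cons, h]

theorem pvFind_occ (arr : List Int) (v : Int) :
    ∀ (s t : Int), t < s →
    (match (pvOcc v s arr).find? (fun i => decide (t < i)) with
      | none => pvConsume v arr = none
      | some i => t < i ∧ ∃ j : Nat, i = s + j ∧ pvConsume v arr = some (arr.drop (j + 1))) := by
  induction arr with
  | nil => intro s t hts; simp [pvOcc, PySem.List.enumerate_nil, pvConsume]
  | cons a arr ih =>
    intro s t hts
    rw [pvOcc_cons]
    by_cases h : a == v
    · rw [if_pos h]
      rw [List.find?_cons_of_pos (p := fun i => decide (t < i)) (by simpa using hts)]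
      refine ⟨hts, 0, by omega, ?_⟩
      simp [pvConsume, h]
    · rw [if_neg h]
      have := ih (s + 1) t (by omega)
      rcases hfind : (pvOcc v (s + 1) arr).find? (fun i => decide (t < i)) with _ | i
      · rw [hfind] at this
        simpa [pvConsume, h] using this
      · rw [hfind] at this
        obtain ⟨hti, j, rfl, hcons⟩ := this
        exact ⟨hti, j + 1, by omega, by simpa [pvConsume, h] using hcons⟩

-- the same, from position 0 with a general threshold t ≥ -1: the prefix up to (t+1) is skipped.
theorem pvOcc_mem_ub (v : Int) (s : Int) (arr : List Int) (x : Int) (hx : x ∈ pvOcc v s arr) :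
    x < s + arr.length := by
  unfold pvOcc at hx
  simp only [List.mem_map, List.mem_filter] at hx
  obtain ⟨p, ⟨hp, _⟩, rfl⟩ := hx
  rw [PySem.List.mem_enumerate_iff] at hp
  obtain ⟨k, hk, rfl⟩ := hp
  simp only
  omega

theorem pvOcc_append (v : Int) (s : Int) (l1 l2 : List Int) :
    pvOcc v s (l1 ++ l2) = pvOcc v s l1 ++ pvOcc v (s + l1.length) l2 := by
  simp [pvOcc, PySem.List.enumerate_append]

theorem pvFind_occ_zero (arr : List Int) (v : Int) (t : Int) (ht : -1 ≤ t) :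
    (match (pvOcc v 0 arr).find? (fun i => decide (t < i)) with
      | none => pvConsume v (arr.drop (t + 1).toNat) = none
      | some i => t < i ∧ pvConsume v (arr.drop (t + 1).toNat) = some (arr.drop (i + 1).toNat)) := by
  set k : Nat := (t + 1).toNat with hk
  have hsplit : arr = arr.take k ++ arr.drop k := (List.take_append_drop k arr).symm
  have hlen : (arr.take k).length = min k arr.length := by simp
  have hocc : pvOcc v 0 arr = pvOcc v 0 (arr.take k) ++ pvOcc v ((arr.take k).length) (arr.drop k) := by
    conv_lhs => rw [hsplit]
    rw [pvOcc_append]; norm_num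
  have hnone : (pvOcc v 0 (arr.take k)).find? (fun i => decide (t < i)) = none := by
    rw [List.find?_eq_none]
    intro x hx
    have := pvOcc_mem_ub v 0 (arr.take k) x hx
    simp only [hlen] at this
    simp only [decide_eq_true_eq]
    omega
  rw [hocc, List.find?_append, hnone, Option.none_or]
  rcases Nat.lt_or_ge k arr.length with hkl | hkl
  · have hs : ((arr.take k).length : Int) = (k : Int) := by simp; omega
    have hts : t < ((arr.take k).length : Int) := by rw [hs]; omega
    have := pvFind_occ (arr.drop k) v ((arr.take k).length) t hts
    rcases hfind : (pvOcc v ((arr.take k).length : Int) (arr.drop k)).find? (fun i => decide (t < i)) with _ | i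
    · rw [hfind] at this; exact this
    · rw [hfind] at this
      obtain ⟨hti, j, rfl, hcons⟩ := this
      refine ⟨hti, ?_⟩
      have hlen2 : (arr.take k).length = k := by simp; omega
      rw [hcons, List.drop_drop, hlen2]
      have harith : ((k : Int) + ↑j + 1).toNat = k + (j + 1) := by omega
      rw [harith]
  · have hdrop : arr.drop k = [] := List.drop_eq_nil_of_le hkl
    rw [hdrop]
    simp [pvOcc, PySem.List.enumerate_nil, pvConsume]

theorem pvLoopB_eq (arr : List Int) (seq : List Int) :
    ∀ t : Int, -1 ≤ t → pvLoopB (pvBuildPos arr) t seq = pvAllIn (arr.drop (t + 1).toNat) seq := by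
  induction seq with
  | nil => intro t ht; simp [pvLoopB, pvAllIn]
  | cons v s ih =>
    intro t ht
    rw [pvLoopB, pvNextPos, pvBuildPos_getD]
    have := pvFind_occ_zero arr v t ht
    rcases hfind : (pvOcc v 0 arr).find? (fun i => decide (t < i)) with _ | i
    · rw [hfind] at this
      rw [pvAllIn, this]
    · rw [hfind] at this
      obtain ⟨hti, hcons⟩ := this
      rw [pvAllIn, hcons]
      exact ih i (by omega)

-- ===== VERDICT (by name: the statement is the Claim_ definition above) =====
theorem isValidSubsequenceOne_spec : Claim_equal_isValidSubsequenceOne := by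
  intro array sequence _
  unfold Spec_isValidSubsequenceOne isValidSubsequenceOne isValidSubsequenceOne_alt
  have hA := pvKey array sequence array.length 0 0 (by omega) (by omega)
  have hB := pvLoopB_eq array sequence (-1) (by omega)
  simp only [List.drop_zero] at hA
  norm_num at hB
  rw [hA, hB]
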